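-- pv_equiv track=rewrite | github.com/xurtis/orienteering-nsw | pull-calendars.py | text_list
-- ===== SOURCE A (Python) =====
-- def text_list(items):
--     items = list(items)
--     text = ""
--
--     if len(items) == 0:
--         return text
--
--     text = items.pop()
--
--     sep = " and "
--     if len(items) == 0:
--         return text
--     elif len(items) > 1:
--         sep = ", and "
--
--     text = items.pop() + sep + text
--     sep = ", "
--
--     while len(items) > 0:
--         text = items.pop() + sep + text
--
--     return text
-- ===== SOURCE B (Python) =====
-- def text_list(items):
--     items = list(items)
--     n = len(items)
--     if n == 0:
--         return ""
--     if n == 1: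
--         return items[0]
--     if n == 2:
--         return items[0] + " and " + items[1]
--     return ", ".join(items[:-1]) + ", and " + items[-1]
-- ===== Notes on version B (the rewrite author's own statement) =====
-- stated objective: simpler
-- what changed: Replaces the pop/prepend while-loop that builds the text right-to-left by repeated string prepending with a direct dispatch on len(items) and a forward slice-and-join for the 3+ case.
import Mathlib
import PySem

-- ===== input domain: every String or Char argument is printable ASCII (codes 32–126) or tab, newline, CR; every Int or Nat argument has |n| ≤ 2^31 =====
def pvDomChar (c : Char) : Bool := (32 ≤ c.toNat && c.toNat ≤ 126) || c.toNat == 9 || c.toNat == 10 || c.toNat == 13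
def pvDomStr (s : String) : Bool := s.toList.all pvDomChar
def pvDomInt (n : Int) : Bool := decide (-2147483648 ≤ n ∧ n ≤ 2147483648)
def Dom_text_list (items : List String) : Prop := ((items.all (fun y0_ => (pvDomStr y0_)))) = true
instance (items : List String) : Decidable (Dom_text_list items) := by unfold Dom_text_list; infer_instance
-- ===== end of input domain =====

-- B replaces A's pop/prepend while-loop (right-to-left accumulation) with a length dispatch
-- and a forward join; objective: simpler.

-- ===== PORT A =====
-- the `while len(items) > 0: text = items.pop() + sep + text` loop with sep = ", "
def textLoopA : List String → String → String
  | [], text => text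
  | x :: xs, text =>
      textLoopA (x :: xs).dropLast ((x :: xs).getLast! ++ ", " ++ text)
termination_by l _ => l.length
decreasing_by simp

def text_list (items : List String) : String :=
  match items.getLast? with                     -- text = items.pop()
  | none => ""                                  -- len(items) == 0 → return ""
  | some last =>
    let rest := items.dropLast
    match rest.getLast? with                    -- second pop
    | none => last                              -- len(items) == 0 → return text
    | some second =>
      let sep := if rest.length > 1 then ", and " else " and "
      textLoopA rest.dropLast (second ++ sep ++ last)

-- ===== PORT B =====
-- port of ", ".join (exact Python join semantics: separator between elements)
def joinComma : List String → String
  | [] => ""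
  | x :: xs => xs.foldl (fun acc y => acc ++ ", " ++ y) x

def text_list_alt (items : List String) : String :=
  if items.length = 0 then ""
  else if items.length = 1 then items.getD 0 ""
  else if items.length = 2 then items.getD 0 "" ++ " and " ++ items.getD 1 ""
  else joinComma items.dropLast ++ ", and " ++ items.getLast!

-- ===== PRECONDITION & SPEC =====
def Spec_text_list (items : List String) (out : String) : Prop := out = text_list_alt items
instance (items : List String) (out : String) : Decidable (Spec_text_list items out) := by unfold Spec_text_list; infer_instance

-- ===== CLAIM (what is proved, stated in full; the proofs are below) =====
def Claim_equal_text_list : Prop := ∀ (items : List String), Dom_text_list items → Spec_text_list items (text_list items)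

-- ===== LEMMAS AND PROOFS =====

theorem joinComma_concat (x : String) (xs : List String) (a : String) :
    joinComma ((x :: xs) ++ [a]) = joinComma (x :: xs) ++ ", " ++ a := by
  simp [joinComma, List.foldl_append]

theorem textLoopA_concat (k : List String) (a t : String) :
    textLoopA (k ++ [a]) t = textLoopA k (a ++ ", " ++ t) := by
  cases k with
  | nil => simp [textLoopA]
  | cons x xs =>
      rw [show (x :: xs) ++ [a] = x :: (xs ++ [a]) from rfl, textLoopA]
      have h1 : (x :: (xs ++ [a])).dropLast = x :: xs := by
        rw [← List.cons_append, List.dropLast_concat]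
      have h2 : (x :: (xs ++ [a])).getLast! = a := by
        have := List.getLast?_concat (l := x :: xs) (a := a)
        simp only [List.cons_append] at this
        simp [this]
      rw [h1, h2]

theorem textLoopA_eq (l : List String) (hl : l ≠ []) (t : String) :
    textLoopA l t = joinComma l ++ ", " ++ t := by
  induction l using List.reverseRecOn generalizing t with
  | nil => exact absurd rfl hl
  | append_singleton k a ih =>
      rw [textLoopA_concat]
      cases k with
      | nil => simp [textLoopA, joinComma]
      | cons x xs =>
          rw [ih (by simp), joinComma_concat]
          simp [String.append_assoc]

-- ===== VERDICT (by name: the statement is the Claim_ definition above) =====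
theorem joinComma_concat' (k : List String) (hk : k ≠ []) (a : String) :
    joinComma (k ++ [a]) = joinComma k ++ ", " ++ a := by
  obtain ⟨x, xs, rfl⟩ := List.exists_cons_of_ne_nil hk
  simp only [List.cons_append, joinComma, List.foldl_append, List.foldl_cons, List.foldl_nil]

theorem text_list_spec : Claim_equal_text_list := by
  intro items _
  unfold Spec_text_list text_list text_list_alt
  induction items using List.reverseRecOn with
  | nil => simp
  | append_singleton m q _ =>
      cases m using List.reverseRecOn with
      | nil => simp
      | append_singleton k p _ =>
          rw [List.getLast?_concat]
          simp only [List.dropLast_concat]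
          rw [List.getLast?_concat]
          simp only []
          by_cases hk : k = []
          · subst hk; simp [textLoopA]
          · have hkl : 0 < k.length := List.length_pos_of_ne_nil hk
            have e0 : ¬ (k ++ [p] ++ [q]).length = 0 := by
              simp only [List.length_append, List.length_cons, List.length_nil]; omega
            have e1 : ¬ (k ++ [p] ++ [q]).length = 1 := by
              simp only [List.length_append, List.length_cons, List.length_nil]; omega
            have e2 : ¬ (k ++ [p] ++ [q]).length = 2 := by
              simp only [List.length_append, List.length_cons, List.length_nil]; omega
            have egt : (k ++ [p]).length > 1 := by
              simp only [List.length_append, List.length_cons, List.length_nil]; omega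
            rw [if_pos egt, if_neg e0, if_neg e1, if_neg e2,
                textLoopA_eq k hk, joinComma_concat' k hk p]
            have : (k ++ [p] ++ [q]).getLast! = q := by simp
            rw [this]
            simp [String.append_assoc]
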